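-- pv_equiv track=rewrite | github.com/YanivZimmer/Applied-probability-models-for-cs-ex-2 | code/ex2.py | counter_to_occourenct_dictionary
-- ===== SOURCE A (Python) =====
-- def counter_to_occourenct_dictionary(counter_data):
--     occurrences_word_dict = {}
--     max_occourence = 0
--     for item, occourence in counter_data.items():
--         if occourence in occurrences_word_dict:
--             occurrences_word_dict[occourence].append(item)
--         else:
--             occurrences_word_dict[occourence] = [item]
--         max_occourence = max(max_occourence, occourence)
--     return occurrences_word_dict, max_occourence
-- ===== SOURCE B (Python) =====
-- def counter_to_occourenct_dictionary(counter_data):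
--     pairs = counter_data.items()
--     occs = list(dict.fromkeys(occ for _, occ in pairs))
--     occurrences_word_dict = {occ: [word for word, o in pairs if o == occ]
--                              for occ in occs}
--     return occurrences_word_dict, max([0, *occs])
-- ===== Notes on version B (the rewrite author's own statement) =====
-- stated objective: alternative
-- what changed: B replaces A's single-pass hash grouping with inline running max by a staged grouped-filter: it first collects the distinct occurrence counts in first-appearance order, then builds each dict entry by filtering the whole input for that count, and takes the max as one reduction over [0]+distinct counts.
import Mathlib
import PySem

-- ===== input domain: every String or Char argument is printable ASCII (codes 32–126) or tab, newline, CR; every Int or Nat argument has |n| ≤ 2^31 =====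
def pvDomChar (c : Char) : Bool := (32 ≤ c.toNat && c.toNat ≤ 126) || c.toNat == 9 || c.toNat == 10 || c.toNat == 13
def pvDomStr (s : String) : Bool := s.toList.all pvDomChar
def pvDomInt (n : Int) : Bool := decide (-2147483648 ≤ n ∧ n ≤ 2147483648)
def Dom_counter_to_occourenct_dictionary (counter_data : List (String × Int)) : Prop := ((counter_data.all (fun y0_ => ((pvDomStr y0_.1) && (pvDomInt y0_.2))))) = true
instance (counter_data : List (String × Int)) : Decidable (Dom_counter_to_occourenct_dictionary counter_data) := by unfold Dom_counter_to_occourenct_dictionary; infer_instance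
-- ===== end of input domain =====

-- B replaces A's one-pass hash grouping with inline running max by a staged grouped-filter:
-- distinct counts first, then one filter pass per distinct count, then a separate max reduction
-- (objective: alternative; return value only).


-- ===== PORT A =====
-- for item, occourence in counter_data.items(): if occourence in d: d[occourence].append(item)
-- else: d[occourence] = [item]; max_occourence = max(max_occourence, occourence)
def counter_to_occourenct_dictionary (counter_data : List (String × Int)) : (List (Int × List String)) × Int :=
  let st := counter_data.foldl
    (fun (st : PySem.Dict Int (List String) × Int) p =>
      let d := if st.1.contains p.2 then st.1.modify p.2 [] (· ++ [p.1])
               else st.1.insert p.2 [p.1]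
      (d, max st.2 p.2))
    (PySem.Dict.empty, 0)
  (st.1.items, st.2)

-- ===== PORT B =====
-- occs = list(dict.fromkeys(occ for _, occ in pairs)); dict comprehension filtering per occ;
-- max([0, *occs]) is Python max of the nonempty list 0 :: occs
def counter_to_occourenct_dictionary_alt (counter_data : List (String × Int)) : (List (Int × List String)) × Int :=
  let occs := PySem.List.dedup (counter_data.map (·.2))
  let d := occs.map (fun occ => (occ, (counter_data.filter (fun p => p.2 == occ)).map (·.1)))
  (d, (PySem.List.max? ((0 : Int) :: occs) (fun x => x)).getD 0)

-- ===== PRECONDITION & SPEC =====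
def Spec_counter_to_occourenct_dictionary (counter_data : List (String × Int)) (out : (List (Int × List String)) × Int) : Prop := out = counter_to_occourenct_dictionary_alt counter_data
instance (counter_data : List (String × Int)) (out : (List (Int × List String)) × Int) : Decidable (Spec_counter_to_occourenct_dictionary counter_data out) := by unfold Spec_counter_to_occourenct_dictionary; infer_instance

-- ===== CLAIM (what is proved, stated in full; the proofs are below) =====
def Claim_equal_counter_to_occourenct_dictionary : Prop := ∀ (counter_data : List (String × Int)), Dom_counter_to_occourenct_dictionary counter_data → Spec_counter_to_occourenct_dictionary counter_data (counter_to_occourenct_dictionary counter_data)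

-- ===== LEMMAS AND PROOFS =====

-- A's if-branch on membership is exactly Dict.modify with default []
theorem stepA_eq_modify (d : PySem.Dict Int (List String)) (k : Int) (s : String) :
    (if d.contains k then d.modify k [] (· ++ [s]) else d.insert k [s]) = d.modify k [] (· ++ [s]) := by
  by_cases h : d.contains k
  · simp [h]
  · simp [h, PySem.Dict.modify,
      PySem.Dict.getD_of_not_contains d [] (eq_false_of_ne_true h)]

-- A's fold splits into the grouping fold paired with a running max over the occurrence values
theorem loopA_split (cd : List (String × Int)) :
    ∀ (d : PySem.Dict Int (List String)) (m : Int),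
      cd.foldl
        (fun (st : PySem.Dict Int (List String) × Int) p =>
          let d' := if st.1.contains p.2 then st.1.modify p.2 [] (· ++ [p.1])
                    else st.1.insert p.2 [p.1]
          (d', max st.2 p.2)) (d, m)
      = (cd.foldl (fun d p => d.modify p.2 [] (· ++ [p.1])) d,
         (cd.map (·.2)).foldl max m) := by
  induction cd with
  | nil => intro d m; rfl
  | cons p t ih =>
      intro d m
      rw [List.foldl_cons, List.foldl_cons, List.map_cons, List.foldl_cons]
      show t.foldl _ ((if d.contains p.2 then d.modify p.2 [] (· ++ [p.1]) else d.insert p.2 [p.1]), max m p.2) = _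
      rw [stepA_eq_modify]
      exact ih _ _

theorem foldl_max_le (xs : List Int) : ∀ (b c : Int), b ≤ c → (∀ a ∈ xs, a ≤ c) → xs.foldl max b ≤ c := by
  induction xs with
  | nil => intro b c hb _; exact hb
  | cons x t ih =>
      intro b c hb hx
      exact ih _ _ (max_le hb (hx x (List.mem_cons_self))) fun a ha => hx a (List.mem_cons_of_mem _ ha)

theorem foldl_max_eq_of_mem_iff (xs ys : List Int) (b : Int) (h : ∀ a, a ∈ xs ↔ a ∈ ys) :
    xs.foldl max b = ys.foldl max b := by
  refine le_antisymm ?_ ?_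
  · exact foldl_max_le xs b _ (PySem.List.le_foldl_max ys b).1
      (fun a ha => (PySem.List.le_foldl_max ys b).2 a ((h a).mp ha))
  · exact foldl_max_le ys b _ (PySem.List.le_foldl_max xs b).1
      (fun a ha => (PySem.List.le_foldl_max xs b).2 a ((h a).mpr ha))

-- A's grouping dict, listed as items, is B's grouped-filter comprehension
theorem itemsA_eq_groupedFilter (cd : List (String × Int)) :
    (cd.foldl (fun d p => d.modify p.2 [] (· ++ [p.1])) PySem.Dict.empty).items
      = (PySem.List.dedup (cd.map (·.2))).map
          (fun occ => (occ, (cd.filter (fun p => p.2 == occ)).map (·.1))) := by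
  have hfold : cd.foldl (fun d p => d.modify p.2 [] (· ++ [p.1])) PySem.Dict.empty
      = (cd.map (fun p => (p.2, p.1))).foldl (fun d q => d.modify q.1 [] (· ++ [q.2])) PySem.Dict.empty := by
    rw [List.foldl_map]
  rw [hfold]
  have hnd : ((cd.map (fun p => (p.2, p.1))).foldl (fun d q => d.modify q.1 [] (· ++ [q.2])) PySem.Dict.empty).keys.Nodup :=
    PySem.Dict.nodup_keys_foldl_modify_key _ _ _ _ _ PySem.Dict.nodup_keys_empty
  rw [PySem.Dict.items_eq_map_keys _ hnd []]
  have hkeys : ((cd.map (fun p => (p.2, p.1))).foldl (fun d q => d.modify q.1 [] (· ++ [q.2])) PySem.Dict.empty).keys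
      = PySem.List.dedup (cd.map (·.2)) := by
    rw [PySem.Dict.keys_foldl_modify_key]
    simp [PySem.Dict.keys_empty, PySem.Set.update_nil_left, List.map_map, PySem.List.dedup_eq_ofList, Function.comp_def]
  rw [hkeys]
  refine List.map_congr_left fun k hk => ?_
  rw [PySem.Dict.getD_foldl_modify_append]
  simp [PySem.Dict.getD_empty, List.filter_map, List.map_map, Function.comp_def]

-- ===== VERDICT (by name: the statement is the Claim_ definition above) =====
theorem counter_to_occourenct_dictionary_spec : Claim_equal_counter_to_occourenct_dictionary := by
  intro cd _
  show counter_to_occourenct_dictionary cd = counter_to_occourenct_dictionary_alt cd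
  unfold counter_to_occourenct_dictionary counter_to_occourenct_dictionary_alt
  dsimp only
  rw [loopA_split]
  refine Prod.ext (itemsA_eq_groupedFilter cd) ?_
  dsimp only
  rw [PySem.List.max?_id_cons, Option.getD_some]
  refine foldl_max_eq_of_mem_iff _ _ 0 fun a => ?_
  simp [PySem.List.mem_dedup, -PySem.List.dedup_eq_ofList]
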